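-- pv_equiv track=rewrite | github.com/niranjangs4/ai-engineer | agentic-qa-framework/agent/react_pipeline.py | heal_selector
-- ===== SOURCE A (Python) =====
-- def heal_selector(selector, dom):
--
--     if not selector:
--         return selector
--
--     selector_lower = selector.lower()
--
--     best_match = None
--
--     for el in dom:
--         text = (el.get("text") or "").lower()
--
--         if not text:
--             continue
--
--         # score based match
--         score = 0
--
--         if selector_lower == text:
--             return el.get("selector")
--
--         elif selector_lower in text:
--             score = 2
--
--         elif all(word in text for word in selector_lower.split()):
--             score = 1
--
--         if score > 0:
--             best_match = el.get("selector")
--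
--     return best_match if best_match else (selector or "")
-- ===== SOURCE B (Python) =====
-- def heal_selector(selector, dom):
--     if not selector:
--         return selector
--     sl = selector.lower()
--
--     # pass 1: first element with non-empty text exactly equal to sl
--     for el in dom:
--         text = (el.get("text") or "").lower()
--         if text and sl == text:
--             return el.get("selector")
--
--     # pass 2: scan in reverse for the last partially-matching element
--     words = sl.split()
--     for el in reversed(dom):
--         text = (el.get("text") or "").lower()
--         if text and (sl in text or all(w in text for w in words)):
--             sel = el.get("selector")
--             return sel if sel else selector
--     return selector
-- ===== Notes on version B (the rewrite author's own statement) =====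
-- stated objective: alternative
-- what changed: Replaces A's single scan with mutable best_match state by two stateless scans: a forward scan that returns on the first exact text match, then a reverse scan whose first partial hit is A's last one, so no accumulator is kept.
import Mathlib
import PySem

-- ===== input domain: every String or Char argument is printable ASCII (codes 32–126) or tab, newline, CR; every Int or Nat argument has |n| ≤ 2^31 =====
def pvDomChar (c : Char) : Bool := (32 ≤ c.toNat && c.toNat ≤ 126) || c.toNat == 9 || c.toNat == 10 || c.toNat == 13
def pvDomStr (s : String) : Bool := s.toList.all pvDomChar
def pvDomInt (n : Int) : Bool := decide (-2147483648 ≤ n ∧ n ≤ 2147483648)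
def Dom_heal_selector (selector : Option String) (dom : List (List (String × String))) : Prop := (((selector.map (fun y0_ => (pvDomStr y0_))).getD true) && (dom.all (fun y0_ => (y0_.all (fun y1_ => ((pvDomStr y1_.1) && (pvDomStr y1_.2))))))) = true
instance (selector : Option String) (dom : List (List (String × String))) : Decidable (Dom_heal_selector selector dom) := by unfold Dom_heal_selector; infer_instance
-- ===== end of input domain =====

-- B replaces A's single scan with a mutable best_match accumulator by two stateless scans
-- (forward for the first exact match, reverse for the last partial match); same cost, no accumulator.

-- text = (el.get("text") or "").lower()   (identical line in Source A and Source B)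
def pvGetText (el : List (String × String)) : String :=
  PySem.Str.lower ((PySem.Dict.get? (PySem.Dict.mk el) "text").getD "")

-- ===== PORT A =====

-- the for-loop of A, carrying best_match (none = Python None; some "" is falsy at the end)
def healLoopA (sl s : String) : List (List (String × String)) → Option String → Option String
  | [], best =>
      match best with
      | some b => if b = "" then some s else some b
      | none => some s
  | el :: rest, best =>
      let text := pvGetText el
      if text = "" then healLoopA sl s rest best
      else if sl = text then PySem.Dict.get? (PySem.Dict.mk el) "selector"
      else
        let score : Int :=
          if PySem.Str.isIn sl text = true then 2
          else if ((PySem.Str.split₀ sl).all (fun w => PySem.Str.isIn w text)) = true then 1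
          else 0
        if score > 0 then healLoopA sl s rest (PySem.Dict.get? (PySem.Dict.mk el) "selector")
        else healLoopA sl s rest best

def heal_selector (selector : Option String) (dom : List (List (String × String))) : Option String :=
  match selector with
  | none => none
  | some s => if s = "" then some s else healLoopA (PySem.Str.lower s) s dom none

-- ===== PORT B =====

-- pass 1: first element whose non-empty text equals sl exactly
def healExactB (sl : String) : List (List (String × String)) → Option (Option String)
  | [] => none
  | el :: rest =>
      let text := pvGetText el
      if text ≠ "" ∧ sl = text then some (PySem.Dict.get? (PySem.Dict.mk el) "selector")
      else healExactB sl rest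

-- pass 2: walk the reversed DOM, return on the first partial match
def healRevB (sl s : String) (words : List String) : List (List (String × String)) → Option String
  | [] => some s
  | el :: rest =>
      let text := pvGetText el
      if text ≠ "" ∧ (PySem.Str.isIn sl text = true ∨
                      (words.all (fun w => PySem.Str.isIn w text)) = true) then
        match PySem.Dict.get? (PySem.Dict.mk el) "selector" with
        | some v => if v = "" then some s else some v
        | none => some s
      else healRevB sl s words rest

def heal_selector_alt (selector : Option String) (dom : List (List (String × String))) : Option String :=
  match selector with
  | none => none
  | some s =>
      if s = "" then some s
      else
        let sl := PySem.Str.lower s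
        match healExactB sl dom with
        | some r => r
        | none => healRevB sl s (PySem.Str.split₀ sl) dom.reverse

-- ===== PRECONDITION & SPEC =====
def Spec_heal_selector (selector : Option String) (dom : List (List (String × String))) (out : Option String) : Prop := out = heal_selector_alt selector dom
instance (selector : Option String) (dom : List (List (String × String))) (out : Option String) : Decidable (Spec_heal_selector selector dom out) := by unfold Spec_heal_selector; infer_instance

-- ===== CLAIM (what is proved, stated in full; the proofs are below) =====
def Claim_equal_heal_selector : Prop := ∀ (selector : Option String) (dom : List (List (String × String))), Dom_heal_selector selector dom → Spec_heal_selector selector dom (heal_selector selector dom)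

-- ===== LEMMAS AND PROOFS =====

-- finalisation of A's best_match at the end of its loop
def pvFinA (s : String) (best : Option String) : Option String :=
  match best with
  | some b => if b = "" then some s else some b
  | none => some s

-- healRevB with a three-valued outcome: none = no partial match on the list
def pvRevCore (sl s : String) (words : List String) : List (List (String × String)) → Option (Option String)
  | [] => none
  | el :: rest =>
      let text := pvGetText el
      if text ≠ "" ∧ (PySem.Str.isIn sl text = true ∨
                      (words.all (fun w => PySem.Str.isIn w text)) = true) then
        some (match PySem.Dict.get? (PySem.Dict.mk el) "selector" with
              | some v => if v = "" then some s else some v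
              | none => some s)
      else pvRevCore sl s words rest

lemma healRevB_eq_core (sl s : String) (words : List String) (l : List (List (String × String))) :
    healRevB sl s words l = match pvRevCore sl s words l with
      | some r => r
      | none => some s := by
  induction l with
  | nil => rfl
  | cons el rest ih =>
      simp only [healRevB, pvRevCore]
      split_ifs with h
      · rfl
      · exact ih

lemma pvRevCore_append (sl s : String) (words : List String)
    (l₁ l₂ : List (List (String × String))) :
    pvRevCore sl s words (l₁ ++ l₂) =
      match pvRevCore sl s words l₁ with
      | some r => some r
      | none => pvRevCore sl s words l₂ := by
  induction l₁ with
  | nil => rfl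
  | cons el rest ih =>
      simp only [List.cons_append, pvRevCore]
      split_ifs with h
      · rfl
      · exact ih

lemma healExactB_cons_skip (sl : String) (el : List (String × String))
    (rest : List (List (String × String)))
    (h : ¬ (pvGetText el ≠ "" ∧ sl = pvGetText el)) :
    healExactB sl (el :: rest) = healExactB sl rest := by
  simp only [healExactB]; rw [if_neg h]

lemma healExactB_cons_hit (sl : String) (el : List (String × String))
    (rest : List (List (String × String)))
    (h : pvGetText el ≠ "" ∧ sl = pvGetText el) :
    healExactB sl (el :: rest) = some (PySem.Dict.get? (PySem.Dict.mk el) "selector") := by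
  simp only [healExactB]; rw [if_pos h]

lemma pvRevCore_singleton_none (sl s : String) (words : List String) (el : List (String × String))
    (h : ¬ (pvGetText el ≠ "" ∧ (PySem.Str.isIn sl (pvGetText el) = true ∨
        (words.all (fun w => PySem.Str.isIn w (pvGetText el))) = true))) :
    pvRevCore sl s words [el] = none := by
  simp only [pvRevCore]; rw [if_neg h]

lemma pvRevCore_singleton_some (sl s : String) (words : List String) (el : List (String × String))
    (h : pvGetText el ≠ "" ∧ (PySem.Str.isIn sl (pvGetText el) = true ∨
        (words.all (fun w => PySem.Str.isIn w (pvGetText el))) = true)) :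
    pvRevCore sl s words [el] =
      some (match PySem.Dict.get? (PySem.Dict.mk el) "selector" with
            | some v => if v = "" then some s else some v
            | none => some s) := by
  simp only [pvRevCore]; rw [if_pos h]

lemma healLoopA_eq (sl s : String) (dom : List (List (String × String))) :
    ∀ best, healLoopA sl s dom best =
      match healExactB sl dom with
      | some r => r
      | none =>
          match pvRevCore sl s (PySem.Str.split₀ sl) dom.reverse with
          | some r => r
          | none => pvFinA s best := by
  induction dom with
  | nil => intro best; rfl
  | cons el rest ih =>
      intro best
      rw [List.reverse_cons, pvRevCore_append]
      by_cases hemp : pvGetText el = ""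
      · -- empty text: skipped by every pass
        have h1 : ¬ (pvGetText el ≠ "" ∧ sl = pvGetText el) := fun h => h.1 hemp
        have h2 : ¬ (pvGetText el ≠ "" ∧ (PySem.Str.isIn sl (pvGetText el) = true ∨
            ((PySem.Str.split₀ sl).all (fun w => PySem.Str.isIn w (pvGetText el))) = true)) :=
          fun h => h.1 hemp
        rw [healExactB_cons_skip sl el rest h1,
            pvRevCore_singleton_none sl s (PySem.Str.split₀ sl) el h2]
        have hstep : healLoopA sl s (el :: rest) best = healLoopA sl s rest best := by
          simp only [healLoopA]; rw [if_pos hemp]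
        rw [hstep, ih best]
        cases hE : healExactB sl rest with
        | some r => rfl
        | none =>
            cases hR : pvRevCore sl s (PySem.Str.split₀ sl) rest.reverse with
            | some r => rfl
            | none => rfl
      · by_cases hex : sl = pvGetText el
        · -- exact match: A returns here, B's first pass finds it
          rw [healExactB_cons_hit sl el rest ⟨hemp, hex⟩]
          simp only [healLoopA]
          rw [if_neg hemp, if_pos hex]
        · -- no exact match at el
          have h1 : ¬ (pvGetText el ≠ "" ∧ sl = pvGetText el) := fun h => hex h.2
          rw [healExactB_cons_skip sl el rest h1]
          by_cases hpos : PySem.Str.isIn sl (pvGetText el) = true ∨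
              ((PySem.Str.split₀ sl).all (fun w => PySem.Str.isIn w (pvGetText el))) = true
          · -- partial match: A updates best_match; el is a hit for B's reverse pass
            rw [pvRevCore_singleton_some sl s (PySem.Str.split₀ sl) el ⟨hemp, hpos⟩]
            have hscore : (if PySem.Str.isIn sl (pvGetText el) = true then (2 : Int)
                else if ((PySem.Str.split₀ sl).all (fun w => PySem.Str.isIn w (pvGetText el))) = true
                then 1 else 0) > 0 := by
              rcases hpos with h | h
              · rw [if_pos h]; norm_num
              · by_cases hin : PySem.Str.isIn sl (pvGetText el) = true
                · rw [if_pos hin]; norm_num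
                · rw [if_neg hin, if_pos h]; norm_num
            have hstep : healLoopA sl s (el :: rest) best =
                healLoopA sl s rest (PySem.Dict.get? (PySem.Dict.mk el) "selector") := by
              simp only [healLoopA]
              rw [if_neg hemp, if_neg hex, if_pos hscore]
            rw [hstep, ih (PySem.Dict.get? (PySem.Dict.mk el) "selector")]
            cases hE : healExactB sl rest with
            | some r => rfl
            | none =>
                cases hR : pvRevCore sl s (PySem.Str.split₀ sl) rest.reverse with
                | some r => rfl
                | none =>
                    cases hsel : PySem.Dict.get? (PySem.Dict.mk el) "selector" with
                    | some v => simp only [pvFinA]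
                    | none => simp only [pvFinA]
          · -- no match at all at el
            have h2 : ¬ (pvGetText el ≠ "" ∧ (PySem.Str.isIn sl (pvGetText el) = true ∨
                ((PySem.Str.split₀ sl).all (fun w => PySem.Str.isIn w (pvGetText el))) = true)) :=
              fun h => hpos h.2
            rw [pvRevCore_singleton_none sl s (PySem.Str.split₀ sl) el h2]
            have hscore : ¬ ((if PySem.Str.isIn sl (pvGetText el) = true then (2 : Int)
                else if ((PySem.Str.split₀ sl).all (fun w => PySem.Str.isIn w (pvGetText el))) = true
                then 1 else 0) > 0) := by
              have hni : ¬ PySem.Str.isIn sl (pvGetText el) = true := fun h => hpos (Or.inl h)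
              have hna : ¬ ((PySem.Str.split₀ sl).all (fun w => PySem.Str.isIn w (pvGetText el))) = true :=
                fun h => hpos (Or.inr h)
              rw [if_neg hni, if_neg hna]; norm_num
            have hstep : healLoopA sl s (el :: rest) best = healLoopA sl s rest best := by
              simp only [healLoopA]
              rw [if_neg hemp, if_neg hex, if_neg hscore]
            rw [hstep, ih best]
            cases hE : healExactB sl rest with
            | some r => rfl
            | none =>
                cases hR : pvRevCore sl s (PySem.Str.split₀ sl) rest.reverse with
                | some r => rfl
                | none => rfl

-- ===== VERDICT (by name: the statement is the Claim_ definition above) =====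
theorem heal_selector_spec : Claim_equal_heal_selector := by
  intro selector dom _
  unfold Spec_heal_selector heal_selector heal_selector_alt
  cases selector with
  | none => rfl
  | some s =>
      show (if s = "" then some s else healLoopA (PySem.Str.lower s) s dom none) =
        (if s = "" then some s else
          match healExactB (PySem.Str.lower s) dom with
          | some r => r
          | none => healRevB (PySem.Str.lower s) s (PySem.Str.split₀ (PySem.Str.lower s)) dom.reverse)
      by_cases hs : s = ""
      · rw [if_pos hs, if_pos hs]
      · rw [if_neg hs, if_neg hs]
        rw [healLoopA_eq, healRevB_eq_core]
        cases healExactB (PySem.Str.lower s) dom with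
        | some r => rfl
        | none =>
            cases pvRevCore (PySem.Str.lower s) s (PySem.Str.split₀ (PySem.Str.lower s)) dom.reverse with
            | some r => rfl
            | none => rfl
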